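-- pv_equiv track=rewrite | github.com/plustemberg/theoretical-catalysis-tools | scripts/postprocess/Density of States/vasp_dos_tools.py | default_grouping
-- ===== SOURCE A (Python) =====
-- from typing import Dict, Iterable, Iterator, List, Optional, Sequence, Tuple
--
-- def default_grouping(labels: Sequence[str]) -> Dict[str, List[str]]:
--     lower = [lab.lower() for lab in labels]
--     grouped: Dict[str, List[str]] = {}
--     if any(lab.startswith("s") for lab in lower):
--         grouped["s"] = [lab for lab in labels if lab.lower().startswith("s")]
--     if any(lab.startswith("p") for lab in lower):
--         grouped["p"] = [lab for lab in labels if lab.lower().startswith("p")]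
--     if any(lab.startswith("d") for lab in lower):
--         grouped["d"] = [lab for lab in labels if lab.lower().startswith("d")]
--     if any(lab.startswith("f") for lab in lower):
--         grouped["f"] = [lab for lab in labels if lab.lower().startswith("f")]
--     if not grouped:
--         for lab in labels:
--             grouped[lab] = [lab]
--     return grouped
-- ===== SOURCE B (Python) =====
-- def default_grouping(labels):
--     index = {}
--     for lab in labels:
--         c = lab.lower()[:1]
--         index.setdefault(c, []).append(lab)
--     grouped = {}
--     for letter in "spdf":
--         if letter in index:
--             grouped[letter] = index[letter]
--     if not grouped:
--         for lab in labels: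
--             grouped[lab] = [lab]
--     return grouped
-- ===== Notes on version B (the rewrite author's own statement) =====
-- stated objective: alternative
-- what changed: Replaces A's four repeated any+filter scans of the label list (one pair per letter) with a single pass that builds a first-character index dict, then emits the s/p/d/f buckets in fixed order from that table; the empty-fallback loop is unchanged.
import Mathlib
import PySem

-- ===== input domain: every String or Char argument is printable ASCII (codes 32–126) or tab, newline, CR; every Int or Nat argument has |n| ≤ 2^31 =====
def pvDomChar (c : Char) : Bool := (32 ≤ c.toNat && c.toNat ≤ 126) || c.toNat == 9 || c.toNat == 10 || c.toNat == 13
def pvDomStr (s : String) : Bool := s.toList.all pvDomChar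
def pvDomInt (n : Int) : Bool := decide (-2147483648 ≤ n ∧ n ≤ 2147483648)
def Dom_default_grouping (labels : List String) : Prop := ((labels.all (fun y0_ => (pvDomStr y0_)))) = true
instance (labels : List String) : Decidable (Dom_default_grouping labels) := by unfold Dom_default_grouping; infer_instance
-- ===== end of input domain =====

-- B replaces A's four repeated scans of the label list by one table-building pass plus a fixed-order "spdf" emission (objective: alternative decomposition).

-- ===== PORT A =====
def default_grouping (labels : List String) : List (String × List String) :=
  let lower := labels.map PySem.Str.lower
  let grouped : PySem.Dict String (List String) := PySem.Dict.empty
  let grouped := if lower.any (fun lab => PySem.Str.startswith lab "s") then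
      grouped.insert "s" (labels.filter (fun lab => PySem.Str.startswith (PySem.Str.lower lab) "s")) else grouped
  let grouped := if lower.any (fun lab => PySem.Str.startswith lab "p") then
      grouped.insert "p" (labels.filter (fun lab => PySem.Str.startswith (PySem.Str.lower lab) "p")) else grouped
  let grouped := if lower.any (fun lab => PySem.Str.startswith lab "d") then
      grouped.insert "d" (labels.filter (fun lab => PySem.Str.startswith (PySem.Str.lower lab) "d")) else grouped
  let grouped := if lower.any (fun lab => PySem.Str.startswith lab "f") then
      grouped.insert "f" (labels.filter (fun lab => PySem.Str.startswith (PySem.Str.lower lab) "f")) else grouped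
  let grouped := if grouped.items.isEmpty then
      labels.foldl (fun g lab => g.insert lab [lab]) grouped else grouped
  grouped.items

-- ===== PORT B =====
-- lab.lower()[:1]
def pvKeyOf (lab : String) : String := PySem.Str.slice (PySem.Str.lower lab) none (some 1)

def default_grouping_alt (labels : List String) : List (String × List String) :=
  let index : PySem.Dict String (List String) :=
    labels.foldl (fun d lab => d.modify (pvKeyOf lab) [] (· ++ [lab])) PySem.Dict.empty
  let grouped : PySem.Dict String (List String) :=
    ["s", "p", "d", "f"].foldl
      (fun g letter => if index.contains letter then g.insert letter (index.getD letter []) else g)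
      PySem.Dict.empty
  let grouped := if grouped.items.isEmpty then
      labels.foldl (fun g lab => g.insert lab [lab]) grouped else grouped
  grouped.items

-- ===== PRECONDITION & SPEC =====
def Spec_default_grouping (labels : List String) (out : List (String × List String)) : Prop := out = default_grouping_alt labels
instance (labels : List String) (out : List (String × List String)) : Decidable (Spec_default_grouping labels out) := by unfold Spec_default_grouping; infer_instance

-- ===== CLAIM (what is proved, stated in full; the proofs are below) =====
def Claim_equal_default_grouping : Prop := ∀ (labels : List String), Dom_default_grouping labels → Spec_default_grouping labels (default_grouping labels)

-- ===== LEMMAS AND PROOFS =====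

-- a single-character prefix test on a string is a test on its first character string s[:1]
theorem pv_startswith_single (lab : String) (c : Char) :
    PySem.Str.startswith (PySem.Str.lower lab) (String.ofList [c]) = (pvKeyOf lab == String.ofList [c]) := by
  rw [Bool.eq_iff_iff]
  rw [PySem.Str.startswith_eq, PySem.Chars.startswith_iff, beq_iff_eq, List.prefix_iff_eq_take]
  have hkey : (pvKeyOf lab).toList = (PySem.Str.lower lab).toList.take 1 := by
    simp only [pvKeyOf, PySem.Str.toList_slice, PySem.Chars.slice_eq_listSlice]
    rw [PySem.List.slice_to _ (by norm_num)]
    norm_num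
  have hs : pvKeyOf lab = String.ofList ((PySem.Str.lower lab).toList.take 1) := by
    have := congrArg String.ofList hkey; simpa using this
  rw [hs]
  simp only [String.toList_ofList, List.length_singleton]
  constructor
  · intro h; exact congrArg String.ofList h.symm
  · intro h; have := congrArg String.toList h; simpa using this.symm

-- the bucket stored in B's index at key c is the filter of labels whose key is c
theorem pv_getD_index (labels : List String) (c : String) :
    (labels.foldl (fun d lab => d.modify (pvKeyOf lab) [] (· ++ [lab])) PySem.Dict.empty).getD c []
      = labels.filter (fun lab => pvKeyOf lab == c) := by
  have h : labels.foldl (fun d lab => d.modify (pvKeyOf lab) [] (· ++ [lab])) PySem.Dict.empty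
      = (labels.map (fun lab => (pvKeyOf lab, lab))).foldl
          (fun d p => d.modify p.1 [] (· ++ [p.2])) PySem.Dict.empty := by
    rw [List.foldl_map]
  rw [h, PySem.Dict.getD_foldl_modify_append]
  simp [List.filter_map, Function.comp_def]

-- B's index has key c exactly when some label has key c
theorem pv_contains_index (labels : List String) (c : String) :
    (labels.foldl (fun d lab => d.modify (pvKeyOf lab) [] (· ++ [lab])) PySem.Dict.empty).contains c
      = labels.any (fun lab => pvKeyOf lab == c) := by
  rw [Bool.eq_iff_iff, PySem.Dict.contains_iff_mem_keys,
      PySem.Dict.keys_foldl_modify_key]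
  simp only [PySem.Set.update]
  have hof : List.foldl PySem.Set.add (PySem.Dict.empty (κ := String) (ν := List String)).keys (labels.map pvKeyOf) = PySem.Set.ofList (labels.map pvKeyOf) := rfl
  rw [hof]
  simp [PySem.Set.mem_ofList, List.any_eq_true]

-- ===== VERDICT (by name: the statement is the Claim_ definition above) =====
theorem default_grouping_spec : Claim_equal_default_grouping := by
  intro labels _
  unfold Spec_default_grouping default_grouping default_grouping_alt
  simp only [List.foldl, List.any_map, Function.comp_def]
  rw [show ("s" : String) = String.ofList ['s'] from rfl, show ("p" : String) = String.ofList ['p'] from rfl,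
      show ("d" : String) = String.ofList ['d'] from rfl, show ("f" : String) = String.ofList ['f'] from rfl]
  simp only [pv_startswith_single, pv_getD_index, pv_contains_index]
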